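-- pv_equiv track=rewrite | github.com/Bapiggott/DatasetCreationAndFineTuning | dataset_creation.py | flip_flags
-- ===== SOURCE A (Python) =====
-- def flip_flags(flags):
--     flag_map = {
--         'F': 0,
--         'S': 1,
--         'R': 2,
--         'P': 3,
--         'A': 4,
--         'U': 5,
--         'E': 6,
--         'C': 7
--     }
--
--     # Initialize the result_flags list with empty strings
--     result_flags = ['', '', '', '', '', '', '', '']
--
--     # Assign the characters to their respective positions in result_flags
--     for flag in flags:
--         if flag in flag_map:
--             result_flags[flag_map[flag]] = flag
--
--     # Filter out the empty strings and join the non-empty flags into a single string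
--     corrected_flags = ''.join(filter(lambda x: x != '', result_flags))
--
--     return corrected_flags
-- ===== SOURCE B (Python) =====
-- def flip_flags(flags):
--     return ''.join(c for c in 'FSRPAUEC' if c in flags)
-- ===== Notes on version B (the rewrite author's own statement) =====
-- stated objective: idiomatic
-- what changed: B drops A's positional bucket list and dict entirely and instead iterates over the 8-char canonical order, keeping each canonical character iff it occurs in the input; the per-character Python loop over the whole input becomes 8 C-level membership tests.
import Mathlib
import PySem

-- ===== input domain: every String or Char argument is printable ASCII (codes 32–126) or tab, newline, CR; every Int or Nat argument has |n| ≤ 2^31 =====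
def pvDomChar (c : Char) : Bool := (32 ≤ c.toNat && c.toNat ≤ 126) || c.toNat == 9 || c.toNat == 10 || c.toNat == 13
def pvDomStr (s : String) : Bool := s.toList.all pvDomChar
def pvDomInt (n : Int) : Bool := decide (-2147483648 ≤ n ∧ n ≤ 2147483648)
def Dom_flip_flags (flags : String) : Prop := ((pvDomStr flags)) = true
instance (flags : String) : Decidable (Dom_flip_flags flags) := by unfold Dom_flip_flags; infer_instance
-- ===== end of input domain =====

-- B re-implements A by iterating over the fixed canonical order 'FSRPAUEC' and testing membership,
-- instead of scattering input chars into an indexed bucket list; same result, no intermediate array.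

-- ===== PORT A =====
def pvFlagMap : PySem.Dict Char Int :=
  PySem.Dict.ofList [('F',0),('S',1),('R',2),('P',3),('A',4),('U',5),('E',6),('C',7)]

def pvLoopA (l : List Char) (rs : List String) : List String :=
  l.foldl (fun rs flag =>
    match pvFlagMap.get? flag with
    | some i => PySem.List.pySetD rs i (String.ofList [flag])
    | none => rs) rs

def flip_flags (flags : String) : String :=
  let result_flags : List String := ["", "", "", "", "", "", "", ""]
  let result_flags := pvLoopA flags.toList result_flags
  PySem.Str.join "" (result_flags.filter (fun x => x ≠ ""))

-- ===== PORT B =====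
def flip_flags_alt (flags : String) : String :=
  PySem.Str.join ""
    ((("FSRPAUEC".toList.filter (fun c => PySem.Str.isIn (String.ofList [c]) flags)).map
      (fun c => String.ofList [c])))

-- ===== PRECONDITION & SPEC =====
def Spec_flip_flags (flags : String) (out : String) : Prop := out = flip_flags_alt flags
instance (flags : String) (out : String) : Decidable (Spec_flip_flags flags out) := by unfold Spec_flip_flags; infer_instance

-- ===== CLAIM (what is proved, stated in full; the proofs are below) =====
def Claim_equal_flip_flags : Prop := ∀ (flags : String), Dom_flip_flags flags → Spec_flip_flags flags (flip_flags flags)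

-- ===== LEMMAS AND PROOFS =====

theorem pvFlagMap_get_none (x : Char) (hF : x ≠ 'F') (hS : x ≠ 'S') (hR : x ≠ 'R')
    (hP : x ≠ 'P') (hA : x ≠ 'A') (hU : x ≠ 'U') (hE : x ≠ 'E') (hC : x ≠ 'C') :
    pvFlagMap.get? x = none := by
  have hit : pvFlagMap.items =
      [('F',(0:Int)),('S',1),('R',2),('P',3),('A',4),('U',5),('E',6),('C',7)] := by decide
  simp [PySem.Dict.get?, hit, Ne.symm hF, Ne.symm hS, Ne.symm hR,
    Ne.symm hP, Ne.symm hA, Ne.symm hU, Ne.symm hE, Ne.symm hC]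

-- invariant of A's loop: bucket i holds canon[i] iff canon[i] occurs in the remaining input
theorem pvLoopA_eq (l : List Char) : ∀ (a b c d e f g h : String),
    pvLoopA l [a,b,c,d,e,f,g,h] =
      [if 'F' ∈ l then "F" else a, if 'S' ∈ l then "S" else b,
       if 'R' ∈ l then "R" else c, if 'P' ∈ l then "P" else d,
       if 'A' ∈ l then "A" else e, if 'U' ∈ l then "U" else f,
       if 'E' ∈ l then "E" else g, if 'C' ∈ l then "C" else h] := by
  induction l with
  | nil => intro a b c d e f g h; simp [pvLoopA]
  | cons x l ih =>
    intro a b c d e f g h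
    rw [show pvLoopA (x :: l) [a,b,c,d,e,f,g,h] =
        pvLoopA l (match pvFlagMap.get? x with
          | some i => PySem.List.pySetD [a,b,c,d,e,f,g,h] i (String.ofList [x])
          | none => [a,b,c,d,e,f,g,h]) from rfl]
    by_cases hF : x = 'F'
    · subst hF
      rw [show pvFlagMap.get? 'F' = some 0 from by decide]
      dsimp only
      rw [show PySem.List.pySetD [a,b,c,d,e,f,g,h] (0:Int) (String.ofList ['F']) =
          ["F",b,c,d,e,f,g,h] from by simp [PySem.List.pySetD, PySem.List.pySet?, PySem.List.pyIdx?]]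
      rw [ih]; simp
    · by_cases hS : x = 'S'
      · subst hS
        rw [show pvFlagMap.get? 'S' = some 1 from by decide]
        dsimp only
        rw [show PySem.List.pySetD [a,b,c,d,e,f,g,h] (1:Int) (String.ofList ['S']) =
            [a,"S",c,d,e,f,g,h] from by simp [PySem.List.pySetD, PySem.List.pySet?, PySem.List.pyIdx?]]
        rw [ih]; simp
      · by_cases hR : x = 'R'
        · subst hR
          rw [show pvFlagMap.get? 'R' = some 2 from by decide]
          dsimp only
          rw [show PySem.List.pySetD [a,b,c,d,e,f,g,h] (2:Int) (String.ofList ['R']) =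
              [a,b,"R",d,e,f,g,h] from by simp [PySem.List.pySetD, PySem.List.pySet?, PySem.List.pyIdx?]]
          rw [ih]; simp
        · by_cases hP : x = 'P'
          · subst hP
            rw [show pvFlagMap.get? 'P' = some 3 from by decide]
            dsimp only
            rw [show PySem.List.pySetD [a,b,c,d,e,f,g,h] (3:Int) (String.ofList ['P']) =
                [a,b,c,"P",e,f,g,h] from by simp [PySem.List.pySetD, PySem.List.pySet?, PySem.List.pyIdx?]]
            rw [ih]; simp
          · by_cases hA : x = 'A'
            · subst hA
              rw [show pvFlagMap.get? 'A' = some 4 from by decide]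
              dsimp only
              rw [show PySem.List.pySetD [a,b,c,d,e,f,g,h] (4:Int) (String.ofList ['A']) =
                  [a,b,c,d,"A",f,g,h] from by simp [PySem.List.pySetD, PySem.List.pySet?, PySem.List.pyIdx?]]
              rw [ih]; simp
            · by_cases hU : x = 'U'
              · subst hU
                rw [show pvFlagMap.get? 'U' = some 5 from by decide]
                dsimp only
                rw [show PySem.List.pySetD [a,b,c,d,e,f,g,h] (5:Int) (String.ofList ['U']) =
                    [a,b,c,d,e,"U",g,h] from by simp [PySem.List.pySetD, PySem.List.pySet?, PySem.List.pyIdx?]]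
                rw [ih]; simp
              · by_cases hE : x = 'E'
                · subst hE
                  rw [show pvFlagMap.get? 'E' = some 6 from by decide]
                  dsimp only
                  rw [show PySem.List.pySetD [a,b,c,d,e,f,g,h] (6:Int) (String.ofList ['E']) =
                      [a,b,c,d,e,f,"E",h] from by simp [PySem.List.pySetD, PySem.List.pySet?, PySem.List.pyIdx?]]
                  rw [ih]; simp
                · by_cases hC : x = 'C'
                  · subst hC
                    rw [show pvFlagMap.get? 'C' = some 7 from by decide]
                    dsimp only
                    rw [show PySem.List.pySetD [a,b,c,d,e,f,g,h] (7:Int) (String.ofList ['C']) =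
                        [a,b,c,d,e,f,g,"C"] from by simp [PySem.List.pySetD, PySem.List.pySet?, PySem.List.pyIdx?]]
                    rw [ih]; simp
                  · rw [pvFlagMap_get_none x hF hS hR hP hA hU hE hC]
                    rw [ih]
                    simp [List.mem_cons, Ne.symm hF, Ne.symm hS, Ne.symm hR, Ne.symm hP,
                      Ne.symm hA, Ne.symm hU, Ne.symm hE, Ne.symm hC]

-- single-char 'c in flags' is list membership
theorem pv_isIn_singleton (c : Char) (s : String) :
    PySem.Str.isIn (String.ofList [c]) s = decide (c ∈ s.toList) := by
  by_cases h : c ∈ s.toList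
  · simp only [h, decide_true]
    rw [PySem.Str.isIn_iff_infix]
    simpa using (List.singleton_infix_iff c s.toList).mpr h
  · simp only [h, decide_false]
    rw [← Bool.not_eq_true, PySem.Str.isIn_iff_infix]
    intro hinf
    exact h ((List.singleton_infix_iff c s.toList).mp (by simpa using hinf))

-- filtering A's ite-buckets = joining B's filtered canonical chars, generically over the canon list
theorem pv_bridge (l : List Char) (cs : List Char) :
    ((cs.map (fun c => if c ∈ l then String.ofList [c] else "")).filter (fun x => x ≠ "")) =
      ((cs.filter (fun c => c ∈ l)).map (fun c => String.ofList [c])) := by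
  induction cs with
  | nil => rfl
  | cons c cs ih =>
    have hne : String.ofList [c] ≠ "" := by
      intro habs
      have : (String.ofList [c]).toList = ("" : String).toList := by rw [habs]
      simp at this
    by_cases h : c ∈ l
    · simp only [List.map_cons, if_pos h]
      rw [List.filter_cons_of_pos, List.filter_cons_of_pos, List.map_cons, ih]
      · simpa using h
      · simp [hne]
    · simp only [List.map_cons, if_neg h]
      rw [List.filter_cons_of_neg, List.filter_cons_of_neg, ih]
      · simpa using h
      · simp

-- ===== VERDICT (by name: the statement is the Claim_ definition above) =====
theorem flip_flags_spec : Claim_equal_flip_flags := by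
  intro flags _
  unfold Spec_flip_flags
  rw [show flip_flags flags =
      PySem.Str.join "" ((pvLoopA flags.toList ["","","","","","","",""]).filter
        (fun x => x ≠ "")) from rfl]
  unfold flip_flags_alt
  rw [pvLoopA_eq]
  rw [show ([if 'F' ∈ flags.toList then "F" else "", if 'S' ∈ flags.toList then "S" else "",
       if 'R' ∈ flags.toList then "R" else "", if 'P' ∈ flags.toList then "P" else "",
       if 'A' ∈ flags.toList then "A" else "", if 'U' ∈ flags.toList then "U" else "",
       if 'E' ∈ flags.toList then "E" else "", if 'C' ∈ flags.toList then "C" else ""] : List String) =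
      ("FSRPAUEC".toList.map (fun c => if c ∈ flags.toList then String.ofList [c] else "")) from by
    simp [show "FSRPAUEC".toList = ['F','S','R','P','A','U','E','C'] from rfl]]
  rw [pv_bridge]
  congr 1
  congr 1
  apply List.filter_congr
  intro c _
  rw [pv_isIn_singleton]
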